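-- pv_equiv track=rewrite | github.com/vpetrigo/courses | programming/adaptive-python/group_2/smallest_pos_num.py | find_smallest_end
-- ===== SOURCE A (Python) =====
-- def find_smallest_end(num1, num2, n1_i, n2_i):
--     while n1_i < len(num1) and n2_i < len(num2):
--         if num1[n1_i] < num2[n2_i]:
--             return True
--         elif num1[n1_i] > num2[n2_i]:
--             return False
--
--         n1_i += 1
--         n2_i += 1
--
--     return True
-- ===== SOURCE B (Python) =====
-- def find_smallest_end(num1, num2, n1_i, n2_i):
--     m = max(0, min(len(num1) - n1_i, len(num2) - n2_i))
--     return num1[n1_i:n1_i + m] <= num2[n2_i:n2_i + m]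
-- ===== Notes on version B (the rewrite author's own statement) =====
-- stated objective: idiomatic
-- what changed: Replaces the explicit indexed while-loop with a single built-in lexicographic comparison of the two tails truncated to their common length.
-- outside the precondition, e.g. on find_smallest_end([1], [0], -1, 0): A returns False, B returns True; on find_smallest_end([1], [1], -3, 0): A raises IndexError, B returns True
import Mathlib
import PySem

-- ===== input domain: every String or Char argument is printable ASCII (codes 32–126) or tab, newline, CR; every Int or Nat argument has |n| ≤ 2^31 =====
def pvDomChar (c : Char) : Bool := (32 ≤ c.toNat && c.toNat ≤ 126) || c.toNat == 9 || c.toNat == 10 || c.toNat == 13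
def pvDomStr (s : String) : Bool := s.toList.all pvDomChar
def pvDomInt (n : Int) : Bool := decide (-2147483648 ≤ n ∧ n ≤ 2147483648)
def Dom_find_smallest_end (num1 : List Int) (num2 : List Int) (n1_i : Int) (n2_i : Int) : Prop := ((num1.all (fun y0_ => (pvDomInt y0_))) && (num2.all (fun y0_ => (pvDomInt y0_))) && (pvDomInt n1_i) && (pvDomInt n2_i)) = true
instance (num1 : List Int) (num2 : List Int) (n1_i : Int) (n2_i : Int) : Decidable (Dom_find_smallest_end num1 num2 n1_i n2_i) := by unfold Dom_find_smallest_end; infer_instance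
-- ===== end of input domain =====

-- B replaces A's indexed while-loop with one lexicographic comparison of the two
-- tails truncated to their common length (objective: idiomatic; equal cost).

-- ===== PORT A =====
-- A's while-loop; where Python would raise IndexError (an offset below -len while
-- the loop condition holds, excluded by Pre_) the port returns true as a placeholder.
def find_smallest_end (num1 : List Int) (num2 : List Int) (n1_i : Int) (n2_i : Int) : Bool :=
  if _h : n1_i < (num1.length : Int) ∧ n2_i < (num2.length : Int) then
    match PySem.List.pyGet? num1 n1_i, PySem.List.pyGet? num2 n2_i with
    | some a, some b =>
      if a < b then true
      else if a > b then false
      else find_smallest_end num1 num2 (n1_i + 1) (n2_i + 1)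
    | _, _ => true
  else true
termination_by ((num1.length : Int) - n1_i).toNat
decreasing_by omega

-- ===== PORT B =====
-- Python's list `<=` : lexicographic comparison.
def lexLe : List Int → List Int → Bool
  | [], _ => true
  | _ :: _, [] => false
  | a :: as, b :: bs => if a < b then true else if a > b then false else lexLe as bs

def find_smallest_end_alt (num1 : List Int) (num2 : List Int) (n1_i : Int) (n2_i : Int) : Bool :=
  let m := max 0 (min ((num1.length : Int) - n1_i) ((num2.length : Int) - n2_i))
  lexLe (PySem.List.slice num1 (some n1_i) (some (n1_i + m)))
        (PySem.List.slice num2 (some n2_i) (some (n2_i + m)))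

-- ===== PRECONDITION & SPEC =====
-- Pre_ excludes negative offsets: there A either raises IndexError (offset < -len
-- while the loop runs) or compares elements through accidental negative-index
-- wraparound, a quirk no caller of this helper relies on; B uses slice semantics there.
def Pre_find_smallest_end (_num1 : List Int) (_num2 : List Int) (n1_i : Int) (n2_i : Int) : Prop :=
  0 ≤ n1_i ∧ 0 ≤ n2_i
instance (num1 : List Int) (num2 : List Int) (n1_i : Int) (n2_i : Int) : Decidable (Pre_find_smallest_end num1 num2 n1_i n2_i) := by unfold Pre_find_smallest_end; infer_instance

def pvWitness_find_smallest_end : List Int × List Int × Int × Int := ([3, 5, 7], [3, 5, 6, 9], 1, 1)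

def Spec_find_smallest_end (num1 : List Int) (num2 : List Int) (n1_i : Int) (n2_i : Int) (out : Bool) : Prop := out = find_smallest_end_alt num1 num2 n1_i n2_i
instance (num1 : List Int) (num2 : List Int) (n1_i : Int) (n2_i : Int) (out : Bool) : Decidable (Spec_find_smallest_end num1 num2 n1_i n2_i out) := by unfold Spec_find_smallest_end; infer_instance

-- ===== CLAIM (what is proved, stated in full; the proofs are below) =====
def Claim_equal_find_smallest_end : Prop := ∀ (num1 : List Int) (num2 : List Int) (n1_i : Int) (n2_i : Int), Dom_find_smallest_end num1 num2 n1_i n2_i → Pre_find_smallest_end num1 num2 n1_i n2_i → Spec_find_smallest_end num1 num2 n1_i n2_i (find_smallest_end num1 num2 n1_i n2_i)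

-- ===== LEMMAS AND PROOFS =====

-- A's loop, on nonnegative offsets, computes the "either side exhausted ⇒ true" comparison of the tails.
def cmpT : List Int → List Int → Bool
  | [], _ => true
  | _ :: _, [] => true
  | a :: as, b :: bs => if a < b then true else if a > b then false else cmpT as bs

theorem lexLe_take (xs ys : List Int) :
    lexLe (xs.take ys.length) (ys.take xs.length) = cmpT xs ys := by
  induction xs generalizing ys with
  | nil => cases ys <;> simp [lexLe, cmpT]
  | cons a as ih =>
    cases ys with
    | nil => simp [lexLe, cmpT]
    | cons b bs =>
      simp only [List.length_cons, List.take_succ_cons, lexLe, cmpT]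
      split_ifs <;> simp [ih]

theorem find_smallest_end_eq_cmpT (num1 num2 : List Int) (i j : Nat) :
    find_smallest_end num1 num2 (i : Int) (j : Int) = cmpT (num1.drop i) (num2.drop j) := by
  by_cases hi : i < num1.length
  · by_cases hj : j < num2.length
    · rw [find_smallest_end]
      have h1 : PySem.List.pyGet? num1 (i : Int) = some num1[i] := by
        simp [hi]
      have h2 : PySem.List.pyGet? num2 (j : Int) = some num2[j] := by
        simp [hj]
      have hd1 : num1.drop i = num1[i] :: num1.drop (i + 1) := List.drop_eq_getElem_cons hi
      have hd2 : num2.drop j = num2[j] :: num2.drop (j + 1) := List.drop_eq_getElem_cons hj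
      rw [dif_pos ⟨by exact_mod_cast hi, by exact_mod_cast hj⟩, h1, h2, hd1, hd2]
      simp only [cmpT]
      split_ifs with h h'
      · rfl
      · rfl
      · have := find_smallest_end_eq_cmpT num1 num2 (i + 1) (j + 1)
        push_cast at this ⊢
        exact this
    · rw [find_smallest_end, dif_neg (fun hc => absurd (show j < num2.length by exact_mod_cast hc.2) hj)]
      rw [List.drop_eq_nil_of_le (show num2.length ≤ j by omega)]
      cases num1.drop i <;> simp [cmpT]
  · rw [find_smallest_end, dif_neg (fun hc => absurd (show i < num1.length by exact_mod_cast hc.1) hi)]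
    rw [List.drop_eq_nil_of_le (show num1.length ≤ i by omega)]
    simp [cmpT]
termination_by num1.length - i
decreasing_by omega

theorem alt_eq_cmpT (num1 num2 : List Int) (i j : Nat) :
    find_smallest_end_alt num1 num2 (i : Int) (j : Int) = cmpT (num1.drop i) (num2.drop j) := by
  unfold find_smallest_end_alt
  set mZ : Int := max 0 (min ((num1.length : Int) - i) ((num2.length : Int) - j)) with hm
  have hm0 : 0 ≤ mZ := le_max_left _ _
  have hmn : mZ = (mZ.toNat : Int) := (Int.toNat_of_nonneg hm0).symm
  have hc1 : (i : Int) + mZ = ((i + mZ.toNat : Nat) : Int) := by push_cast; omega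
  have hc2 : (j : Int) + mZ = ((j + mZ.toNat : Nat) : Int) := by push_cast; omega
  have h1 : PySem.List.slice num1 (some (i : Int)) (some ((i : Int) + mZ))
      = (num1.drop i).take mZ.toNat := by
    rw [hc1, PySem.List.slice_natCast]; congr 1; omega
  have h2 : PySem.List.slice num2 (some (j : Int)) (some ((j : Int) + mZ))
      = (num2.drop j).take mZ.toNat := by
    rw [hc2, PySem.List.slice_natCast]; congr 1; omega
  simp only [h1, h2]
  have hlen1 : (num1.drop i).length = num1.length - i := List.length_drop ..
  have hlen2 : (num2.drop j).length = num2.length - j := List.length_drop ..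
  have hkey : mZ.toNat = min (num1.length - i) (num2.length - j) := by omega
  have e1 : (num1.drop i).take mZ.toNat = (num1.drop i).take ((num2.drop j).length) := by
    rw [hkey, hlen2]
    rcases Nat.lt_or_ge (num2.length - j) (num1.length - i) with h | h
    · rw [Nat.min_eq_right (le_of_lt h)]
    · rw [Nat.min_eq_left h, List.take_of_length_le (by omega), List.take_of_length_le (by omega)]
  have e2 : (num2.drop j).take mZ.toNat = (num2.drop j).take ((num1.drop i).length) := by
    rw [hkey, hlen1]
    rcases Nat.lt_or_ge (num1.length - i) (num2.length - j) with h | h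
    · rw [Nat.min_eq_left (le_of_lt h)]
    · rw [Nat.min_eq_right h, List.take_of_length_le (by omega), List.take_of_length_le (by omega)]
  rw [e1, e2, lexLe_take]

-- ===== VERDICT (by name: the statement is the Claim_ definition above) =====
theorem find_smallest_end_spec : Claim_equal_find_smallest_end := by
  intro num1 num2 n1_i n2_i _ hpre
  obtain ⟨h1, h2⟩ := hpre
  unfold Spec_find_smallest_end
  obtain ⟨i, rfl⟩ : ∃ i : Nat, n1_i = (i : Int) := ⟨n1_i.toNat, (Int.toNat_of_nonneg h1).symm⟩
  obtain ⟨j, rfl⟩ : ∃ j : Nat, n2_i = (j : Int) := ⟨n2_i.toNat, (Int.toNat_of_nonneg h2).symm⟩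
  rw [find_smallest_end_eq_cmpT, alt_eq_cmpT]
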